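-- pv_equiv track=rewrite | github.com/conzaytsev/Potential_promoter_search | results_intersection.py | nested_min
-- ===== SOURCE A (Python) =====
-- def nested_min(data, key):
--     min_value = data[0][key]
--     index = 0
--     for i in range(len(data)):
--         line = data[i]
--         if line[key] < min_value:
--             min_value = line[key]
--             index = i
--     return index
-- ===== SOURCE B (Python) =====
-- def nested_min(data, key):
--     min_value = data[0][key]
--     for line in data[1:]:
--         if line[key] < min_value:
--             min_value = line[key]
--     for i in range(len(data)):
--         if data[i][key] == min_value:
--             return i
-- ===== Notes on version B (the rewrite author's own statement) =====
-- stated objective: alternative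
-- what changed: A fuses tracking of min value and its index in one loop; B separates them into two passes: first compute the minimum key value, then return the first index whose key value equals it.
import Mathlib
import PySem

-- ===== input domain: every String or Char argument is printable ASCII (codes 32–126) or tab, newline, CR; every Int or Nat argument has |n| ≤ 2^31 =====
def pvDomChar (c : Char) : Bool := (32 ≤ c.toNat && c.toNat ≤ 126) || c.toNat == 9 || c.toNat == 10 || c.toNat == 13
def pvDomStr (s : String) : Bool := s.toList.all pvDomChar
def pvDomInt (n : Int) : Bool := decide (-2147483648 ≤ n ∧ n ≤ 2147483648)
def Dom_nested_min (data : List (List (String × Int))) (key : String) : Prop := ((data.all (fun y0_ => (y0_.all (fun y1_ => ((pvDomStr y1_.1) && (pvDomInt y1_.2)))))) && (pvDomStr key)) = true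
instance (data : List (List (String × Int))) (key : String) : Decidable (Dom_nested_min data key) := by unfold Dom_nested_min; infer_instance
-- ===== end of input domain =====

-- B separates A's fused min-value/min-index loop into two passes (min value, then first index
-- with that value); same O(n) cost, proved to return A's exact value on Pre_.

-- line[key] for a Python dict rendered as an association list: first match, default 0 is only
-- reached outside Pre_ (where Python raises KeyError).
def dval (key : String) (line : List (String × Int)) : Int :=
  (List.lookup key line).getD 0

-- ===== PORT A =====
def nested_min (data : List (List (String × Int))) (key : String) : Int :=
  let min0 := dval key (PySem.List.pyGetD data 0 [])
  (( PySem.List.pyRange 0 (PySem.List.len data) 1).foldl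
    (fun (st : Int × Int) i =>
      let line := PySem.List.pyGetD data i []
      if dval key line < st.1 then (dval key line, i) else st)
    (min0, 0)).2

-- ===== PORT B =====
def nested_min_alt (data : List (List (String × Int))) (key : String) : Int :=
  let min0 := dval key (PySem.List.pyGetD data 0 [])
  let m := (data.drop 1).foldl
    (fun acc line => if dval key line < acc then dval key line else acc) min0
  ((data.findIdx (fun line => dval key line == m) : Nat) : Int)

-- ===== PRECONDITION & SPEC =====
-- Pre_ excludes exactly where Python A raises: empty data (IndexError) and rows missing key (KeyError).
def Pre_nested_min (data : List (List (String × Int))) (key : String) : Prop :=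
  data ≠ [] ∧ ∀ line ∈ data, (List.lookup key line).isSome = true
instance (data : List (List (String × Int))) (key : String) : Decidable (Pre_nested_min data key) := by unfold Pre_nested_min; infer_instance

def pvWitness_nested_min : (List (List (String × Int))) × String := ([[("a", 2)], [("a", 1)]], "a")

def Spec_nested_min (data : List (List (String × Int))) (key : String) (out : Int) : Prop := out = nested_min_alt data key
instance (data : List (List (String × Int))) (key : String) (out : Int) : Decidable (Spec_nested_min data key out) := by unfold Spec_nested_min; infer_instance

-- ===== CLAIM (what is proved, stated in full; the proofs are below) =====
def Claim_equal_nested_min : Prop := ∀ (data : List (List (String × Int))) (key : String), Dom_nested_min data key → Pre_nested_min data key → Spec_nested_min data key (nested_min data key)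

-- ===== LEMMAS AND PROOFS =====

-- B's first loop, generalized over the valuation f.
def fmin {α : Type} (f : α → Int) (ws : List α) (m : Int) : Int :=
  ws.foldl (fun acc x => if f x < acc then f x else acc) m

theorem fmin_le {α : Type} (f : α → Int) (ws : List α) (m : Int) : fmin f ws m ≤ m := by
  induction ws generalizing m with
  | nil => simp [fmin]
  | cons w ws ih =>
    simp only [fmin, List.foldl_cons]
    split_ifs with h
    · exact le_of_lt (lt_of_le_of_lt (ih (f w)) h)
    · exact ih m

-- A's fused loop, characterized: the final min is fmin, and the final index is the first
-- position achieving it (offset by s) if the min strictly improved, else the seed index.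
theorem loopA {α : Type} (f : α → Int) (ws : List α) (s : Int) (m j : Int) :
    (PySem.List.enumerate ws s).foldl
      (fun (st : Int × Int) p => if f p.2 < st.1 then (f p.2, p.1) else st) (m, j)
    = (fmin f ws m,
       if fmin f ws m < m then s + ((ws.findIdx (fun x => f x == fmin f ws m) : Nat) : Int) else j) := by
  induction ws generalizing s m j with
  | nil => simp [fmin, PySem.List.enumerate_nil]
  | cons w ws ih =>
    rw [PySem.List.enumerate_cons]
    simp only [List.foldl_cons]
    by_cases hw : f w < m
    · rw [if_pos hw, ih]
      have hfw : fmin f (w :: ws) m = fmin f ws (f w) := by simp [fmin, hw]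
      have hle : fmin f ws (f w) ≤ f w := fmin_le f ws (f w)
      rw [hfw, if_pos (lt_of_le_of_lt hle hw)]
      by_cases hlt : fmin f ws (f w) < f w
      · rw [if_pos hlt]
        have hne : (f w == fmin f ws (f w)) = false := by
          simp only [beq_eq_false_iff_ne, ne_eq]; omega
        rw [List.findIdx_cons, hne]
        simp only [cond_false]
        push_cast
        ring_nf
      · rw [if_neg hlt]
        have heq : (f w == fmin f ws (f w)) = true := by
          simp only [beq_iff_eq]; omega
        rw [List.findIdx_cons, heq]
        simp
    · rw [if_neg hw, ih]
      have hfw : fmin f (w :: ws) m = fmin f ws m := by simp [fmin, hw]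
      rw [hfw]
      by_cases hlt : fmin f ws m < m
      · rw [if_pos hlt, if_pos hlt]
        have hne : (f w == fmin f ws m) = false := by
          simp only [beq_eq_false_iff_ne, ne_eq]; omega
        rw [List.findIdx_cons, hne]
        simp only [cond_false]
        push_cast
        ring_nf
      · rw [if_neg hlt, if_neg hlt]

-- ===== VERDICT (by name: the statement is the Claim_ definition above) =====
theorem nested_min_spec : Claim_equal_nested_min := by
  intro data key _ hpre
  obtain ⟨hne, _⟩ := hpre
  obtain ⟨d, rest, rfl⟩ : ∃ d rest, data = d :: rest := by
    cases data with
    | nil => exact absurd rfl hne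
    | cons d rest => exact ⟨d, rest, rfl⟩
  unfold Spec_nested_min nested_min nested_min_alt
  simp only
  -- rewrite A's pyRange/pyGetD fold as a fold over enumerate
  have henum := PySem.List.enumerate_eq_map_pyRange (d :: rest) ([] : List (String × Int))
  have h2 : (PySem.List.pyRange 0 (PySem.List.len (d :: rest)) 1).foldl
      (fun (st : Int × Int) i =>
        if dval key (PySem.List.pyGetD (d :: rest) i []) < st.1 then
          (dval key (PySem.List.pyGetD (d :: rest) i []), i) else st)
      (dval key (PySem.List.pyGetD (d :: rest) 0 []), 0)
    = (PySem.List.enumerate (d :: rest) 0).foldl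
      (fun (st : Int × Int) p => if dval key p.2 < st.1 then (dval key p.2, p.1) else st)
      (dval key (PySem.List.pyGetD (d :: rest) 0 []), 0) := by
    rw [henum, List.foldl_map]
  rw [h2]
  simp only [PySem.List.pyGetD_zero_cons, List.drop_one, List.tail_cons]
  rw [loopA (dval key) (d :: rest) 0 (dval key d) 0]
  have hfw : fmin (dval key) (d :: rest) (dval key d) = fmin (dval key) rest (dval key d) := by
    simp [fmin]
  rw [hfw]
  have hm : (rest.foldl (fun acc line => if dval key line < acc then dval key line else acc)
      (dval key d)) = fmin (dval key) rest (dval key d) := rfl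
  rw [hm]
  set M := fmin (dval key) rest (dval key d) with hM
  have hle : M ≤ dval key d := fmin_le (dval key) rest (dval key d)
  by_cases hlt : M < dval key d
  · rw [if_pos hlt]
    simp
  · rw [if_neg hlt]
    have heq : (dval key d == M) = true := by simp only [beq_iff_eq]; omega
    rw [List.findIdx_cons, heq]
    simp
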